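-- pv_equiv track=rewrite | github.com/vbhayden/Quest-64-Lua-Resources | python/sims/nepty.py | advance_lcg
-- ===== SOURCE A (Python) =====
-- def advance_lcg(a, c, m, steps):
--     a_n = pow(a, steps, m)
--
--     sum_ = 0
--     cur = 1
--     for _ in range(steps):
--         sum_ = (sum_ + cur) % m
--         cur = (cur * a) % m
--
--     c_n = (c * sum_) % m
--     return a_n, c_n
-- ===== SOURCE B (Python) =====
-- def _powsum(x, n, m):
--     # returns (x**n % m, (1 + x + ... + x**(n-1)) % m) for n >= 0, by recursive halving
--     if n <= 0:
--         return 1 % m, 0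
--     p, s = _powsum(x, n // 2, m)
--     p2 = p * p % m
--     s2 = s * (p + 1) % m
--     if n % 2:
--         return p2 * x % m, (s2 * x + 1) % m
--     return p2, s2
--
--
-- def advance_lcg(a, c, m, steps):
--     a_n, s = _powsum(a % m, steps, m)
--     return a_n, c * s % m
-- ===== Notes on version B (the rewrite author's own statement) =====
-- stated objective: faster
-- what changed: Replaces A's O(steps) loop accumulating the geometric series 1+a+...+a^(steps-1) mod m (and the separate builtin pow call) by a single recursive-halving computation that returns (a^n mod m, geometric sum mod m) in O(log steps) multiplications.
-- outside the precondition, e.g. on advance_lcg(3, 1, 5, -1): A returns (2, 0), B returns (1, 0); on advance_lcg(2, 0, 4, -1): A raises ValueError, B returns (1, 0)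
import Mathlib
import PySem

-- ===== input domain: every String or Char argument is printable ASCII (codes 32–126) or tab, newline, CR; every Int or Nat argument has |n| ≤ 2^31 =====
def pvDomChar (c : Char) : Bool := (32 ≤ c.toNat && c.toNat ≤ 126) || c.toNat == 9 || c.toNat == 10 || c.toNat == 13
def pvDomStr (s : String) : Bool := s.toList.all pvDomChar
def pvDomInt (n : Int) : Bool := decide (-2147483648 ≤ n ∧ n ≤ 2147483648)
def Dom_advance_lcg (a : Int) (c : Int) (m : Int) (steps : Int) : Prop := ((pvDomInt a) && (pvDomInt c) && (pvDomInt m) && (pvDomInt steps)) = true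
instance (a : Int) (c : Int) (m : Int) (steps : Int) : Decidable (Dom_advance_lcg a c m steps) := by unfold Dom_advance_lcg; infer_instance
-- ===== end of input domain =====

-- B replaces A's O(steps) geometric-sum loop by an O(log steps) recursive-halving
-- computation of (a^n mod m, (1+a+...+a^(n-1)) mod m); objective: faster (asymptotic).

-- ===== PORT A =====
-- pow(a, steps, m) is PySem.Int.powMod; steps.toNat is faithful on Pre_ (0 ≤ steps).
def advance_lcg (a : Int) (c : Int) (m : Int) (steps : Int) : List Int :=
  let a_n := PySem.Int.powMod a steps.toNat m
  let st := (PySem.List.pyRange 0 steps 1).foldl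
    (fun (p : Int × Int) _ => (PySem.Int.mod (p.1 + p.2) m, PySem.Int.mod (p.2 * a) m)) (0, 1)
  let c_n := PySem.Int.mod (c * st.1) m
  [a_n, c_n]

-- ===== PORT B =====
-- _powsum from Source B: recursion on n // 2; the Nat fuel (n.toNat + 1, halved depth suffices
-- a fortiori) only makes the structural recursion explicit, the zero-fuel branch is unreachable.
def pvPowsumGo (x : Int) (m : Int) : Int -> Nat -> Int × Int
  | _, 0 => (PySem.Int.mod 1 m, 0)
  | n, fuel + 1 =>
    if n ≤ 0 then (PySem.Int.mod 1 m, 0)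
    else
      let r := pvPowsumGo x m (PySem.Int.floordiv n 2) fuel
      let p2 := PySem.Int.mod (r.1 * r.1) m
      let s2 := PySem.Int.mod (r.2 * (r.1 + 1)) m
      if PySem.Int.mod n 2 ≠ 0 then (PySem.Int.mod (p2 * x) m, PySem.Int.mod (s2 * x + 1) m)
      else (p2, s2)

def pvPowsum (x : Int) (n : Int) (m : Int) : Int × Int := pvPowsumGo x m n (n.toNat + 1)

def advance_lcg_alt (a : Int) (c : Int) (m : Int) (steps : Int) : List Int :=
  let r := pvPowsum (PySem.Int.mod a m) steps m
  [r.1, PySem.Int.mod (c * r.2) m]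

-- ===== PRECONDITION & SPEC =====
-- Pre_ excludes m = 0, where A raises ValueError in pow, and steps < 0 with a ≢ 1 (mod m),
-- where A either raises ValueError (no modular inverse) or returns a nontrivial modular
-- inverse via pow(a, steps, m), a feature B's nonnegative-exponent halving does not reproduce
-- (for a ≡ 1 (mod m) that inverse is 1 % m, which B also returns, so those stay claimed).
def Pre_advance_lcg (a : Int) (c : Int) (m : Int) (steps : Int) : Prop :=
  m ≠ 0 ∧ (0 ≤ steps ∨ PySem.Int.mod a m = PySem.Int.mod 1 m)
instance (a : Int) (c : Int) (m : Int) (steps : Int) : Decidable (Pre_advance_lcg a c m steps) := by unfold Pre_advance_lcg; infer_instance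
def pvWitness_advance_lcg : Int × Int × Int × Int := (3, 7, 10, 5)

def Spec_advance_lcg (a : Int) (c : Int) (m : Int) (steps : Int) (out : List Int) : Prop := out = advance_lcg_alt a c m steps
instance (a : Int) (c : Int) (m : Int) (steps : Int) (out : List Int) : Decidable (Spec_advance_lcg a c m steps out) := by unfold Spec_advance_lcg; infer_instance

-- ===== CLAIM (what is proved, stated in full; the proofs are below) =====
def Claim_equal_advance_lcg : Prop := ∀ (a : Int) (c : Int) (m : Int) (steps : Int), Dom_advance_lcg a c m steps → Pre_advance_lcg a c m steps → Spec_advance_lcg a c m steps (advance_lcg a c m steps)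
-- ===== LEMMAS AND PROOFS =====

-- Python's % (fmod) only depends on the residue class of its first argument.
theorem pvMod_congr {m x y : Int} (h : x ≡ y [ZMOD m]) :
    PySem.Int.mod x m = PySem.Int.mod y m := by
  have h' : x % m = y % m := h
  have hd : m ∣ x ↔ m ∣ y := by
    rw [Int.dvd_iff_emod_eq_zero, Int.dvd_iff_emod_eq_zero, h']
  simp only [PySem.Int.mod, Int.fmod_eq_emod, h', hd]

theorem pvMod_modeq (m x : Int) : PySem.Int.mod x m ≡ x [ZMOD m] := by
  show PySem.Int.mod x m % m = x % m
  simp only [PySem.Int.mod, Int.fmod_eq_emod]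
  split <;> simp [Int.add_emod_right]

theorem pvGsum_modeq {m x y : Int} (n : Nat) (h : x ≡ y [ZMOD m]) :
    (∑ i ∈ Finset.range n, x ^ i) ≡ (∑ i ∈ Finset.range n, y ^ i) [ZMOD m] := by
  induction n with
  | zero => simp [Int.ModEq.refl]
  | succ k ih =>
    rw [geom_sum_succ', geom_sum_succ']
    exact (h.pow k).add ih

theorem pvGsum_two_mul (x : Int) (k : Nat) :
    (∑ i ∈ Finset.range (2 * k), x ^ i) = (∑ i ∈ Finset.range k, x ^ i) * (x ^ k + 1) := by
  rw [two_mul, Finset.sum_range_add]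
  have : ∀ i, x ^ (k + i) = x ^ k * x ^ i := fun i => pow_add x k i
  simp only [this, ← Finset.mul_sum]
  ring

theorem pvPowsumGo_spec (m x : Int) (fuel : Nat) : ∀ n : Nat, n < fuel →
    pvPowsumGo x m (n : Int) fuel =
      (PySem.Int.mod (x ^ n) m, PySem.Int.mod (∑ i ∈ Finset.range n, x ^ i) m) := by
  induction fuel with
  | zero => omega
  | succ f ih =>
    intro n hn
    rw [pvPowsumGo]
    by_cases h0 : n = 0
    · subst h0; simp [PySem.Int.mod]
    · rw [if_neg (by omega)]
      have hfd : PySem.Int.floordiv (n : Int) 2 = ((n / 2 : Nat) : Int) := by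
        exact_mod_cast PySem.Int.floordiv_natCast n 2
      have hmd : PySem.Int.mod (n : Int) 2 = ((n % 2 : Nat) : Int) := by
        exact_mod_cast PySem.Int.mod_natCast n 2
      rw [hfd, ih (n / 2) (by omega)]
      set k := n / 2 with hk
      have hp2 : PySem.Int.mod (PySem.Int.mod (x ^ k) m * PySem.Int.mod (x ^ k) m) m
          = PySem.Int.mod (x ^ (2 * k)) m := by
        refine pvMod_congr ?_
        calc PySem.Int.mod (x ^ k) m * PySem.Int.mod (x ^ k) m
            ≡ x ^ k * x ^ k [ZMOD m] := (pvMod_modeq m _).mul (pvMod_modeq m _)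
          _ = x ^ (2 * k) := by rw [two_mul, pow_add]
      have hs2 : PySem.Int.mod (PySem.Int.mod (∑ i ∈ Finset.range k, x ^ i) m * (PySem.Int.mod (x ^ k) m + 1)) m
          = PySem.Int.mod (∑ i ∈ Finset.range (2 * k), x ^ i) m := by
        refine pvMod_congr ?_
        calc PySem.Int.mod (∑ i ∈ Finset.range k, x ^ i) m * (PySem.Int.mod (x ^ k) m + 1)
            ≡ (∑ i ∈ Finset.range k, x ^ i) * (x ^ k + 1) [ZMOD m] :=
              (pvMod_modeq m _).mul ((pvMod_modeq m _).add (Int.ModEq.refl 1))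
          _ = ∑ i ∈ Finset.range (2 * k), x ^ i := (pvGsum_two_mul x k).symm
      rcases Nat.even_or_odd n with he | ho
      · have h2 : n % 2 = 0 := Nat.even_iff.mp he
        have hn2 : n = 2 * k := by omega
        rw [hmd, h2]
        simp only [Nat.cast_zero]
        rw [if_neg (by simp)]
        rw [hp2, hs2, hn2]
      · have h2 : n % 2 = 1 := Nat.odd_iff.mp ho
        have hn2 : n = 2 * k + 1 := by omega
        rw [hmd, h2]
        rw [if_pos (by simp)]
        refine Prod.ext ?_ ?_
        · show PySem.Int.mod (PySem.Int.mod (PySem.Int.mod (x ^ k) m * PySem.Int.mod (x ^ k) m) m * x) m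
              = PySem.Int.mod (x ^ n) m
          rw [hp2]
          refine pvMod_congr ?_
          calc PySem.Int.mod (x ^ (2 * k)) m * x
              ≡ x ^ (2 * k) * x [ZMOD m] := (pvMod_modeq m _).mul (Int.ModEq.refl x)
            _ = x ^ n := by rw [hn2, pow_succ]
        · show PySem.Int.mod (PySem.Int.mod (PySem.Int.mod (∑ i ∈ Finset.range k, x ^ i) m * (PySem.Int.mod (x ^ k) m + 1)) m * x + 1) m
              = PySem.Int.mod (∑ i ∈ Finset.range n, x ^ i) m
          rw [hs2]
          refine pvMod_congr ?_
          calc PySem.Int.mod (∑ i ∈ Finset.range (2 * k), x ^ i) m * x + 1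
              ≡ (∑ i ∈ Finset.range (2 * k), x ^ i) * x + 1 [ZMOD m] :=
                ((pvMod_modeq m _).mul (Int.ModEq.refl x)).add (Int.ModEq.refl 1)
            _ = ∑ i ∈ Finset.range n, x ^ i := by
                rw [hn2, geom_sum_succ]; ring

theorem pvPowsum_spec (m x : Int) (n : Nat) :
    pvPowsum x (n : Int) m =
      (PySem.Int.mod (x ^ n) m, PySem.Int.mod (∑ i ∈ Finset.range n, x ^ i) m) := by
  unfold pvPowsum
  rw [Int.toNat_natCast]
  exact pvPowsumGo_spec m x (n + 1) n (by omega)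

-- A's loop state after n iterations is congruent to (geometric sum, a^n) mod m.
theorem pvLoopA_modeq (m a : Int) (n : Nat) :
    ((PySem.List.pyRange 0 (n : Int) 1).foldl
      (fun (p : Int × Int) _ => (PySem.Int.mod (p.1 + p.2) m, PySem.Int.mod (p.2 * a) m)) (0, 1)).1
      ≡ (∑ i ∈ Finset.range n, a ^ i) [ZMOD m] ∧
    ((PySem.List.pyRange 0 (n : Int) 1).foldl
      (fun (p : Int × Int) _ => (PySem.Int.mod (p.1 + p.2) m, PySem.Int.mod (p.2 * a) m)) (0, 1)).2
      ≡ a ^ n [ZMOD m] := by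
  induction n with
  | zero => simp [Int.ModEq.refl]
  | succ k ih =>
    have hsplit : PySem.List.pyRange 0 ((k + 1 : Nat) : Int) 1
        = PySem.List.pyRange 0 (k : Int) 1 ++ [(k : Int)] := by
      push_cast
      exact PySem.List.pyRange_one_succ_right (by positivity)
    rw [hsplit, List.foldl_append]
    obtain ⟨ih1, ih2⟩ := ih
    constructor
    · show PySem.Int.mod (_ + _) m ≡ _ [ZMOD m]
      calc PySem.Int.mod (_ + _) m
          ≡ _ + _ [ZMOD m] := pvMod_modeq m _
        _ ≡ (∑ i ∈ Finset.range k, a ^ i) + a ^ k [ZMOD m] := ih1.add ih2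
        _ = ∑ i ∈ Finset.range (k + 1), a ^ i := by rw [geom_sum_succ']; ring
    · show PySem.Int.mod (_ * a) m ≡ _ [ZMOD m]
      calc PySem.Int.mod (_ * a) m
          ≡ _ * a [ZMOD m] := pvMod_modeq m _
        _ ≡ a ^ k * a [ZMOD m] := ih2.mul (Int.ModEq.refl a)
        _ = a ^ (k + 1) := (pow_succ a k).symm

-- The main case: for 0 ≤ steps the two ports agree (no precondition on m needed).
theorem pvMain_advance_lcg (a c m steps : Int) (hs : 0 ≤ steps) :
    advance_lcg a c m steps = advance_lcg_alt a c m steps := by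
  obtain ⟨n, rfl⟩ : ∃ n : Nat, steps = (n : Int) := ⟨steps.toNat, (Int.toNat_of_nonneg hs).symm⟩
  obtain ⟨h1, h2⟩ := pvLoopA_modeq m a n
  simp only [advance_lcg, advance_lcg_alt, pvPowsum_spec, Int.toNat_natCast,
    List.cons.injEq, and_true]
  refine ⟨?_, ?_⟩
  · show PySem.Int.mod (a ^ n) m = PySem.Int.mod ((PySem.Int.mod a m) ^ n) m
    exact (pvMod_congr ((pvMod_modeq m a).pow n)).symm
  · refine pvMod_congr ?_
    exact (Int.ModEq.refl c).mul
      (h1.trans ((pvGsum_modeq n (pvMod_modeq m a)).symm.trans (pvMod_modeq m _).symm))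

-- ===== VERDICT (by name: the statement is the Claim_ definition above) =====
theorem advance_lcg_spec : Claim_equal_advance_lcg := by
  intro a c m steps _ hpre
  unfold Spec_advance_lcg
  by_cases hs : 0 ≤ steps
  · exact pvMain_advance_lcg a c m steps hs
  · -- steps < 0 with a ≡ 1 (mod m): both sides are [1 % m, 0]:
    -- A's range is empty and pow's exponent clamps to 0.
    unfold advance_lcg advance_lcg_alt pvPowsum
    rw [Int.toNat_of_nonpos (by omega), PySem.List.pyRange_one_eq_nil (by omega)]
    rw [pvPowsumGo, if_pos (by omega)]
    simp [PySem.Int.powMod]
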